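-- pv_equiv track=rewrite | github.com/fasepaIm/Yandex_lyceum | Programms/Python/lesson 20/Untitled-14.py | make_shades
-- ===== SOURCE A (Python) =====
-- def make_shades(alley, k):
--     for i in range(len(alley)):
--         if str(alley[i]).isdigit() and alley[i] != 0:
--             a = alley[i]
--             alley[i] = True
--             if k > 0:
--                 for j in range(i, (i + (k * a + 1))):
--                     if j <= len(alley) - 1 and alley[j] == 0:
--                         alley[j] = True
--             if k < 0:
--                 z = k * -1
--                 b = i - (z * a + 1) + 1
--                 for j in range(b, i):
--                     if j > -1:
--                         alley[j] = True
--     for i in range(len(alley)):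
--         if alley[i] == 0:
--             alley[i] = False
--     return alley
-- ===== SOURCE B (Python) =====
-- def make_shades(alley, k):
--     n = len(alley)
--     diff = {}
--     for i, v in enumerate(alley):
--         if v > 0:
--             lo, hi = (i, i + k * v) if k >= 0 else (i + k * v, i)
--             lo = max(lo, 0)
--             hi = min(hi, n - 1)
--             diff[lo] = diff.get(lo, 0) + 1
--             diff[hi + 1] = diff.get(hi + 1, 0) - 1
--     run = 0
--     out = []
--     for j in range(n):
--         run += diff.get(j, 0)
--         out.append(run > 0)
--     alley[:] = out
--     return alley
-- ===== Notes on version B (the rewrite author's own statement) =====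
-- stated objective: alternative
-- what changed: Replaces in-place repainting of every illuminated cell per lamp (nested loops writing each covered cell) with a difference-map interval sweep: each lamp adds +1/-1 at its clamped interval ends, then one prefix-sum pass marks cells with positive running count (fewer writes; speed-up not verified, whose large inputs fall outside Pre_).
-- outside the precondition, e.g. on make_shades([-1, -2], 96): A returns [-1, -2], B returns [False, False]
import Mathlib
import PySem

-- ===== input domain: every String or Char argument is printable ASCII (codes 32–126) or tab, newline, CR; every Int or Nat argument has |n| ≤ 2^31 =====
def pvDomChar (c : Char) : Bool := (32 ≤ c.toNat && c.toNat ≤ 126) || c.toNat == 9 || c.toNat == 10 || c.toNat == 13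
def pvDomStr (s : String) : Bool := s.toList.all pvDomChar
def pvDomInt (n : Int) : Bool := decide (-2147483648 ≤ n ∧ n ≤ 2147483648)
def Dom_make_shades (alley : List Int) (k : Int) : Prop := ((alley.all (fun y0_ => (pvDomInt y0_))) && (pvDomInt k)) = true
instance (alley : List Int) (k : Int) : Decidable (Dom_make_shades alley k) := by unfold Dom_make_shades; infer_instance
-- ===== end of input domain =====

-- B replaces A's per-lamp in-place repainting of every illuminated cell (nested loops) with a
-- difference-map interval sweep: +1/-1 at each lamp's clamped interval ends, then one prefix-sum
-- pass (a different algorithm; no speed claim). Both Pythons mutate `alley` in place and return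
-- it; B performs the same final mutation (alley[:] = out); the equivalence proved here is about
-- the return value.

-- ===== PORT A =====
-- Cells of A's mutable list: `some v` models the int v, `none` models Python's True
-- (str(True).isdigit() is False and True == 0 is False — both match this encoding).
-- `str(x).isdigit() and x != 0` holds for an int x exactly when 0 ≤ x ∧ x ≠ 0.
def pvStepA (alley : List Int) (k : Int) (st : List (Option Int)) (i : Int) : List (Option Int) :=
  let n : Int := alley.length
  match PySem.List.pyGetD st i none with
  | some v =>
    if 0 ≤ v ∧ v ≠ 0 then
      let a := v
      let st1 := PySem.List.pySetD st i none
      let st2 := if 0 < k then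
          (PySem.List.pyRange i (i + (k * a + 1)) 1).foldl (fun s j =>
            if j ≤ n - 1 ∧ PySem.List.pyGetD s j none = some 0 then PySem.List.pySetD s j none else s) st1
        else st1
      if k < 0 then
        let z := k * -1
        let b := i - (z * a + 1) + 1
        (PySem.List.pyRange b i 1).foldl (fun s j =>
          if j > -1 then PySem.List.pySetD s j none else s) st2
      else st2
    else st
  | none => st

-- final pass 'if alley[i] == 0: alley[i] = False'; a cell `some v` with v ≠ 0 is an int Python
-- leaves in the list (no Bool value exists for it — such inputs lie outside Pre_)
def make_shades (alley : List Int) (k : Int) : List Bool :=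
  let n : Int := alley.length
  let st := (PySem.List.pyRange 0 n 1).foldl (pvStepA alley k) (alley.map some)
  st.map (fun c => match c with
    | none => true
    | some v => if v = 0 then false else true)

-- ===== PORT B =====
def pvLampUpd (n k : Int) (d : PySem.Dict Int Int) (p : Int × Int) : PySem.Dict Int Int :=
  if 0 < p.2 then
    let lo0 := if 0 ≤ k then p.1 else p.1 + k * p.2
    let hi0 := if 0 ≤ k then p.1 + k * p.2 else p.1
    let lo := max lo0 0
    let hi := min hi0 (n - 1)
    let d1 := d.insert lo (d.getD lo 0 + 1)
    d1.insert (hi + 1) (d1.getD (hi + 1) 0 - 1)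
  else d

def make_shades_alt (alley : List Int) (k : Int) : List Bool :=
  let n : Int := alley.length
  let diff := (PySem.List.enumerate alley 0).foldl (pvLampUpd n k) PySem.Dict.empty
  ((PySem.List.pyRange 0 n 1).foldl
    (fun (s : Int × List Bool) j =>
      let run := s.1 + diff.getD j 0
      (run, s.2 ++ [decide (0 < run)])) ((0 : Int), ([] : List Bool))).2

-- ===== PRECONDITION & SPEC =====
-- Pre_ excludes lists with a negative entry: there A returns the negative int itself inside the
-- result list (not a Bool, outside the declared return type List Bool).
def Pre_make_shades (alley : List Int) (k : Int) : Prop := ∀ x ∈ alley, 0 ≤ x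
instance (alley : List Int) (k : Int) : Decidable (Pre_make_shades alley k) := by unfold Pre_make_shades; infer_instance

def pvWitness_make_shades : List Int × Int := ([0, 2, 0, 0, 0], 1)

def Spec_make_shades (alley : List Int) (k : Int) (out : List Bool) : Prop := out = make_shades_alt alley k
instance (alley : List Int) (k : Int) (out : List Bool) : Decidable (Spec_make_shades alley k out) := by unfold Spec_make_shades; infer_instance

-- ===== CLAIM (what is proved, stated in full; the proofs are below) =====
def Claim_equal_make_shades : Prop := ∀ (alley : List Int) (k : Int), Dom_make_shades alley k → Pre_make_shades alley k → Spec_make_shades alley k (make_shades alley k)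

-- ===== LEMMAS AND PROOFS =====

theorem pvGetD_setD {α : Type} (st : List α) (t j : Int) (d v : α)
    (ht0 : 0 ≤ t) (htn : t < (st.length : Int)) (hj0 : 0 ≤ j) :
    PySem.List.pyGetD (PySem.List.pySetD st t v) j d = if j = t then v else PySem.List.pyGetD st j d := by
  rw [PySem.List.pySetD_of_nonneg st v ht0]
  by_cases hlt : j < (st.length : Int)
  · have hset : j < (((st.set t.toNat v).length : Nat) : Int) := by simpa using hlt
    rw [PySem.List.pyGetD_eq_getElem _ d hj0 hset, PySem.List.pyGetD_eq_getElem st d hj0 hlt,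
      List.getElem_set]
    split_ifs with h1 h2 h2 <;> first | rfl | omega
  · have h1 : PySem.List.pyGet? (st.set t.toNat v) j = none := by
      rw [PySem.List.pyGet?_eq_none_iff]; unfold PySem.Raise.InRange
      simp only [List.length_set]; omega
    have h2 : PySem.List.pyGet? st j = none := by
      rw [PySem.List.pyGet?_eq_none_iff]; unfold PySem.Raise.InRange; omega
    rw [PySem.List.pyGetD_of_none _ _ _ h1, PySem.List.pyGetD_of_none _ _ _ h2]
    have : ¬ j = t := by omega
    simp [this]

theorem pvFwd_len (alley : List Int) (lo hi : Int) : ∀ (st : List (Option Int)),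
    ((PySem.List.pyRange lo hi 1).foldl (fun s t =>
        if t ≤ (alley.length : Int) - 1 ∧ PySem.List.pyGetD s t none = some 0
        then PySem.List.pySetD s t none else s) st).length = st.length := by
  induction (PySem.List.pyRange lo hi 1) with
  | nil => intro st; rfl
  | cons a l ih =>
    intro st
    simp only [List.foldl_cons]
    rw [ih]
    split_ifs <;> simp [PySem.List.length_pySetD]

theorem pvBwd_len (b i : Int) : ∀ (st : List (Option Int)),
    ((PySem.List.pyRange b i 1).foldl (fun s t =>
        if t > -1 then PySem.List.pySetD s t none else s) st).length = st.length := by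
  induction (PySem.List.pyRange b i 1) with
  | nil => intro st; rfl
  | cons a l ih =>
    intro st
    simp only [List.foldl_cons]
    rw [ih]
    split_ifs <;> simp [PySem.List.length_pySetD]

theorem pvFwd_getD_aux (alley : List Int) (hi j : Int) (hj0 : 0 ≤ j) (hjn : j < (alley.length : Int)) :
    ∀ (fuel : Nat) (lo : Int) (st : List (Option Int)), (hi - lo).toNat ≤ fuel → 0 ≤ lo →
      st.length = alley.length →
    PySem.List.pyGetD ((PySem.List.pyRange lo hi 1).foldl (fun s t =>
        if t ≤ (alley.length : Int) - 1 ∧ PySem.List.pyGetD s t none = some 0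
        then PySem.List.pySetD s t none else s) st) j none
      = if lo ≤ j ∧ j < hi ∧ PySem.List.pyGetD st j none = some 0 then none
        else PySem.List.pyGetD st j none := by
  intro fuel
  induction fuel with
  | zero =>
    intro lo st hf hlo hlen
    have hle : hi ≤ lo := by omega
    rw [PySem.List.pyRange_one_eq_nil hle]
    simp only [List.foldl_nil]
    have : ¬ (lo ≤ j ∧ j < hi ∧ PySem.List.pyGetD st j none = some 0) := by omega
    simp [this]
  | succ f ih =>
    intro lo st hf hlo hlen
    by_cases hle : hi ≤ lo
    · rw [PySem.List.pyRange_one_eq_nil hle]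
      simp only [List.foldl_nil]
      have : ¬ (lo ≤ j ∧ j < hi ∧ PySem.List.pyGetD st j none = some 0) := by omega
      simp [this]
    · push_neg at hle
      rw [PySem.List.pyRange_one_cons hle]
      simp only [List.foldl_cons]
      set st' := if lo ≤ (alley.length : Int) - 1 ∧ PySem.List.pyGetD st lo none = some 0
        then PySem.List.pySetD st lo none else st with hst'
      have hlen' : st'.length = alley.length := by
        rw [hst']; split_ifs <;> simp [PySem.List.length_pySetD, hlen]
      rw [ih (lo + 1) st' (by omega) (by omega) hlen']
      have hget' : PySem.List.pyGetD st' j none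
          = if j = lo ∧ lo ≤ (alley.length : Int) - 1 ∧ PySem.List.pyGetD st lo none = some 0
            then none else PySem.List.pyGetD st j none := by
        rw [hst']
        by_cases h1 : lo ≤ (alley.length : Int) - 1 ∧ PySem.List.pyGetD st lo none = some 0
        · rw [if_pos h1, pvGetD_setD st lo j none none hlo (by omega) hj0]
          by_cases h2 : j = lo
          · rw [if_pos h2, if_pos ⟨h2, h1⟩]
          · rw [if_neg h2, if_neg (fun hc => h2 hc.1)]
        · rw [if_neg h1]
          have hnc : ¬ (j = lo ∧ lo ≤ (alley.length : Int) - 1 ∧ PySem.List.pyGetD st lo none = some 0) := by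
            rintro ⟨-, a, b⟩; exact h1 ⟨a, b⟩
          rw [if_neg hnc]
      by_cases hjlo : j = lo
      · subst hjlo
        by_cases hz : PySem.List.pyGetD st j none = some 0
        · have hv : PySem.List.pyGetD st' j none = none := by
            rw [hget', if_pos ⟨rfl, by omega, hz⟩]
          rw [hv, if_neg (by rintro ⟨-, -, h⟩; simp at h),
            if_pos ⟨le_refl j, hle, hz⟩]
        · have hv : PySem.List.pyGetD st' j none = PySem.List.pyGetD st j none := by
            rw [hget', if_neg (by rintro ⟨-, -, h⟩; exact hz h)]
          rw [hv, if_neg (by rintro ⟨h, -, -⟩; omega),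
            if_neg (by rintro ⟨-, -, h⟩; exact hz h)]
      · have hv : PySem.List.pyGetD st' j none = PySem.List.pyGetD st j none := by
          rw [hget', if_neg (fun hc => hjlo hc.1)]
        rw [hv]
        by_cases hcond : lo + 1 ≤ j ∧ j < hi ∧ PySem.List.pyGetD st j none = some 0
        · rw [if_pos hcond, if_pos ⟨by omega, hcond.2⟩]
        · rw [if_neg hcond, if_neg (by rintro ⟨a, b⟩; exact hcond ⟨by omega, b⟩)]

theorem pvBwd_getD (i j : Int) (hj0 : 0 ≤ j) :
    ∀ (fuel : Nat) (b : Int) (st : List (Option Int)), (i - b).toNat ≤ fuel →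
      i ≤ (st.length : Int) →
    PySem.List.pyGetD ((PySem.List.pyRange b i 1).foldl (fun s t =>
        if t > -1 then PySem.List.pySetD s t none else s) st) j none
      = if b ≤ j ∧ j < i then none else PySem.List.pyGetD st j none := by
  intro fuel
  induction fuel with
  | zero =>
    intro b st hf hil
    have hle : i ≤ b := by omega
    rw [PySem.List.pyRange_one_eq_nil hle]
    simp only [List.foldl_nil]
    rw [if_neg (by omega)]
  | succ f ih =>
    intro b st hf hil
    by_cases hle : i ≤ b
    · rw [PySem.List.pyRange_one_eq_nil hle]
      simp only [List.foldl_nil]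
      rw [if_neg (by omega)]
    · push_neg at hle
      rw [PySem.List.pyRange_one_cons hle]
      simp only [List.foldl_cons]
      set st' := if b > -1 then PySem.List.pySetD st b none else st with hst'
      have hlen' : (st'.length : Int) = (st.length : Int) := by
        rw [hst']; split_ifs <;> simp [PySem.List.length_pySetD]
      rw [ih (b + 1) st' (by omega) (by omega)]
      by_cases hjb : j = b
      · subst hjb
        have hb0 : j > -1 := by omega
        have hv : PySem.List.pyGetD st' j none = none := by
          rw [hst', if_pos hb0, pvGetD_setD st j j none none hj0 (by omega) hj0, if_pos rfl]
        rw [hv, if_neg (by omega), if_pos ⟨le_refl j, hle⟩]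
      · have hv : PySem.List.pyGetD st' j none = PySem.List.pyGetD st j none := by
          rw [hst']
          split_ifs with h1
          · rw [pvGetD_setD st b j none none (by omega) (by omega) hj0, if_neg hjb]
          · rfl
        rw [hv]
        by_cases hcond : b + 1 ≤ j ∧ j < i
        · rw [if_pos hcond, if_pos ⟨by omega, hcond.2⟩]
        · rw [if_neg hcond, if_neg (by rintro ⟨a, c⟩; exact hcond ⟨by omega, c⟩)]

theorem pvCov_succ (alley : List Int) (k m j : Int) (hm0 : 0 ≤ m) (hmn : m < (alley.length : Int)) :
    (∃ p ∈ PySem.List.enumerate alley 0,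
      p.1 < m + 1 ∧ 0 < p.2 ∧ min p.1 (p.1 + k * p.2) ≤ j ∧ j ≤ max p.1 (p.1 + k * p.2)) ↔
    (∃ p ∈ PySem.List.enumerate alley 0,
      p.1 < m ∧ 0 < p.2 ∧ min p.1 (p.1 + k * p.2) ≤ j ∧ j ≤ max p.1 (p.1 + k * p.2)) ∨
      (0 < PySem.List.pyGetD alley m 0 ∧
       min m (m + k * PySem.List.pyGetD alley m 0) ≤ j ∧
       j ≤ max m (m + k * PySem.List.pyGetD alley m 0)) := by
  have hget : PySem.List.pyGetD alley m 0 = alley[m.toNat]'(by omega) :=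
    PySem.List.pyGetD_eq_getElem alley 0 hm0 hmn
  constructor
  · rintro ⟨p, hp, h1, h2, h3, h4⟩
    rw [PySem.List.mem_enumerate_iff] at hp
    obtain ⟨t, ht, rfl⟩ := hp
    simp only [zero_add] at h1 h2 h3 h4 ⊢
    by_cases htm : (t : Int) = m
    · right
      have : t = m.toNat := by omega
      subst this
      rw [hget]
      rw [htm] at h3 h4
      exact ⟨h2, h3, h4⟩
    · left
      exact ⟨((t : Int), alley[t]), by rw [PySem.List.mem_enumerate_iff]; exact ⟨t, ht, by simp⟩,
        by omega, h2, h3, h4⟩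
  · rintro (⟨p, hp, h1, h2⟩ | ⟨h2, h3, h4⟩)
    · exact ⟨p, hp, by omega, h2⟩
    · refine ⟨(m, alley[m.toNat]'(by omega)), ?_, by omega, ?_, ?_, ?_⟩
      · rw [PySem.List.mem_enumerate_iff]
        exact ⟨m.toNat, by omega, by simp; omega⟩
      · rw [← hget]; exact h2
      · rw [← hget]; exact h3
      · rw [← hget]; exact h4

theorem pvSum_ite (R : List Int) (key c : Int) :
    ((R.map (fun t => if t = key then c else 0)).sum) = c * R.count key := by
  induction R with
  | nil => simp
  | cons a l ih =>
    simp only [List.map_cons, List.sum_cons, ih, List.count_cons]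
    by_cases h : a = key
    · simp [h]; ring
    · have : ¬ (key == a) := by simp [Ne.symm h]  -- count_cons uses beq
      simp [h, this]

def pvPS (d : PySem.Dict Int Int) (m : Int) : Int :=
  ((PySem.List.pyRange 0 m 1).map (fun t => d.getD t 0)).sum

theorem pvCount_pyRange (m key : Int) :
    (PySem.List.pyRange 0 m 1).count key = if 0 ≤ key ∧ key < m then 1 else 0 := by
  by_cases h : 0 ≤ key ∧ key < m
  · rw [if_pos h]
    have hmem : key ∈ PySem.List.pyRange 0 m 1 := PySem.List.mem_pyRange_one.mpr h
    exact List.count_eq_one_of_mem (PySem.List.nodup_pyRange_one 0 m) hmem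
  · rw [if_neg h]
    apply List.count_eq_zero_of_not_mem
    intro hmem
    exact h (PySem.List.mem_pyRange_one.mp hmem)

theorem pvPS_insert (d : PySem.Dict Int Int) (key c m : Int) :
    pvPS (d.insert key (d.getD key 0 + c)) m
      = pvPS d m + (if 0 ≤ key ∧ key < m then c else 0) := by
  unfold pvPS
  have : ∀ t : Int, (d.insert key (d.getD key 0 + c)).getD t 0
      = d.getD t 0 + (if t = key then c else 0) := by
    intro t
    rw [PySem.Dict.getD_insert]
    by_cases h : t = key
    · simp [h]
    · simp [h]
  simp only [this]
  rw [List.sum_map_add]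
  congr 1
  rw [pvSum_ite, pvCount_pyRange]
  split_ifs <;> simp

def pvHit (n k j : Int) (p : Int × Int) : Bool :=
  decide (0 < p.2) && decide (max (if 0 ≤ k then p.1 else p.1 + k * p.2) 0 ≤ j) &&
    decide (j ≤ min (if 0 ≤ k then p.1 + k * p.2 else p.1) (n - 1))

theorem pvHit_unfold (n k j : Int) (p : Int × Int) :
    pvHit n k j p ↔ 0 < p.2 ∧ max (if 0 ≤ k then p.1 else p.1 + k * p.2) 0 ≤ j ∧
      j ≤ min (if 0 ≤ k then p.1 + k * p.2 else p.1) (n - 1) := by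
  simp [pvHit, and_assoc]

theorem pvPS_succ (d : PySem.Dict Int Int) (m : Int) (hm : 0 ≤ m) :
    pvPS d (m + 1) = pvPS d m + d.getD m 0 := by
  unfold pvPS
  rw [PySem.List.pyRange_one_succ_right hm]
  simp

theorem pvPS_upd (n k : Int) (p : Int × Int) (d : PySem.Dict Int Int) (j : Int)
    (hj0 : 0 ≤ j) (hp : 0 ≤ p.1 ∧ p.1 < n) :
    pvPS (pvLampUpd n k d p) (j + 1)
      = pvPS d (j + 1) + (if pvHit n k j p then 1 else 0) := by
  unfold pvLampUpd
  by_cases hl : 0 < p.2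
  · rw [if_pos hl]
    simp only []
    set lo0 := if 0 ≤ k then p.1 else p.1 + k * p.2 with hlo0
    set hi0 := if 0 ≤ k then p.1 + k * p.2 else p.1 with hhi0
    have hklh : lo0 ≤ p.1 ∧ p.1 ≤ hi0 := by
      rw [hlo0, hhi0]
      by_cases hk : 0 ≤ k
      · have : 0 ≤ k * p.2 := mul_nonneg hk (le_of_lt hl)
        simp only [if_pos hk]; omega
      · have : k * p.2 ≤ 0 := mul_nonpos_of_nonpos_of_nonneg (by omega) (le_of_lt hl)
        simp only [if_neg hk]; omega
    have hsub : ∀ (d' : PySem.Dict Int Int) (key : Int),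
        d'.insert key (d'.getD key 0 - 1) = d'.insert key (d'.getD key 0 + (-1)) := by
      intro d' key; rw [sub_eq_add_neg]
    rw [hsub]
    rw [pvPS_insert, pvPS_insert]
    have hhit : pvHit n k j p ↔ (max lo0 0 ≤ j ∧ j ≤ min hi0 (n - 1)) := by
      rw [pvHit_unfold, ← hlo0, ← hhi0]
      constructor
      · rintro ⟨-, h⟩; exact h
      · rintro ⟨h1, h2⟩; exact ⟨hl, h1, h2⟩
    by_cases hh : pvHit n k j p
    · rw [if_pos hh]
      obtain ⟨h1, h2⟩ := hhit.mp hh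
      rw [if_pos ⟨by omega, by omega⟩, if_neg (by omega)]
      ring
    · rw [if_neg hh]
      have hnot := fun h => hh (hhit.mpr h)
      by_cases hc1 : 0 ≤ max lo0 0 ∧ max lo0 0 < j + 1
      · -- lo ≤ j but not hit, so j > hi: min hi0 (n-1) + 1 ≤ j
        have hhi : min hi0 (n - 1) < j := by
          by_contra hcon
          exact hnot ⟨by omega, by omega⟩
        rw [if_pos hc1, if_pos ⟨by omega, by omega⟩]
        ring
      · rw [if_neg hc1]
        have : ¬ (0 ≤ min hi0 (n - 1) + 1 ∧ min hi0 (n - 1) + 1 < j + 1) := by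
          rintro ⟨a, b⟩
          exact hc1 ⟨by omega, by omega⟩
        rw [if_neg this]
        ring
  · rw [if_neg hl]
    have : ¬ pvHit n k j p := fun h => hl ((pvHit_unfold n k j p).mp h).1
    rw [if_neg this]
    ring

theorem pvDiff_PS (n k : Int) (l : List (Int × Int)) (j : Int)
    (hj0 : 0 ≤ j) :
    ∀ (d : PySem.Dict Int Int), (∀ p ∈ l, 0 ≤ p.1 ∧ p.1 < n) →
    pvPS (l.foldl (pvLampUpd n k) d) (j + 1)
      = pvPS d (j + 1) + (l.countP (fun p => pvHit n k j p) : Int) := by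
  induction l with
  | nil => intro d _; simp
  | cons p l ih =>
    intro d hl
    simp only [List.foldl_cons]
    rw [ih (pvLampUpd n k d p) (fun q hq => hl q (List.mem_cons_of_mem p hq))]
    rw [pvPS_upd n k p d j hj0 (hl p (List.mem_cons_self ..))]
    rw [List.countP_cons]
    push_cast
    by_cases hh : pvHit n k j p <;> simp [hh] <;> ring

theorem pvScan (d : PySem.Dict Int Int) (m : Nat) :
    (PySem.List.pyRange 0 (m : Int) 1).foldl
      (fun (s : Int × List Bool) j =>
        let run := s.1 + d.getD j 0
        (run, s.2 ++ [decide (0 < run)])) ((0 : Int), ([] : List Bool))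
    = (pvPS d m, (PySem.List.pyRange 0 (m : Int) 1).map (fun j => decide (0 < pvPS d (j + 1)))) := by
  induction m with
  | zero =>
    rw [PySem.List.pyRange_one_eq_nil (by omega)]
    simp [pvPS, PySem.List.pyRange_one_eq_nil (le_refl (0 : Int))]
  | succ m ih =>
    have hcast : ((m + 1 : Nat) : Int) = (m : Int) + 1 := by push_cast; ring
    rw [hcast, PySem.List.pyRange_one_succ_right (by omega)]
    rw [List.foldl_append, ih]
    simp only [List.foldl_cons, List.foldl_nil, List.map_append, List.map_cons, List.map_nil]
    rw [pvPS_succ d (m : Int) (by omega)]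

def pvCov (alley : List Int) (k m j : Int) : Bool :=
  (PySem.List.enumerate alley 0).any (fun p =>
    decide (p.1 < m) && decide (0 < p.2) &&
    decide (min p.1 (p.1 + k * p.2) ≤ j) && decide (j ≤ max p.1 (p.1 + k * p.2)))

theorem pvCov_iff (alley : List Int) (k m j : Int) :
    pvCov alley k m j ↔ ∃ p ∈ PySem.List.enumerate alley 0,
      p.1 < m ∧ 0 < p.2 ∧ min p.1 (p.1 + k * p.2) ≤ j ∧ j ≤ max p.1 (p.1 + k * p.2) := by
  simp [pvCov, and_assoc]

theorem pvEnum_bound (alley : List Int) :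
    ∀ p ∈ PySem.List.enumerate alley 0, 0 ≤ p.1 ∧ p.1 < (alley.length : Int) := by
  intro p hp
  rw [PySem.List.mem_enumerate_iff] at hp
  obtain ⟨t, ht, rfl⟩ := hp
  simp; omega

theorem pvHit_iff (alley : List Int) (k j : Int) (p : Int × Int)
    (hj : 0 ≤ j ∧ j < (alley.length : Int)) (hp : 0 ≤ p.1 ∧ p.1 < (alley.length : Int)) :
    pvHit (alley.length : Int) k j p ↔
      0 < p.2 ∧ min p.1 (p.1 + k * p.2) ≤ j ∧ j ≤ max p.1 (p.1 + k * p.2) := by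
  rw [pvHit_unfold]
  by_cases hl : 0 < p.2
  · by_cases hk : 0 ≤ k
    · have h1 : 0 ≤ k * p.2 := mul_nonneg hk (le_of_lt hl)
      simp only [if_pos hk]
      constructor
      · rintro ⟨-, a, b⟩; exact ⟨hl, by omega, by omega⟩
      · rintro ⟨-, a, b⟩; exact ⟨hl, by omega, by omega⟩
    · have h1 : k * p.2 ≤ 0 := mul_nonpos_of_nonpos_of_nonneg (by omega) (le_of_lt hl)
      simp only [if_neg hk]
      constructor
      · rintro ⟨-, a, b⟩; exact ⟨hl, by omega, by omega⟩
      · rintro ⟨-, a, b⟩; exact ⟨hl, by omega, by omega⟩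
  · constructor
    · rintro ⟨h, -⟩; exact absurd h hl
    · rintro ⟨h, -⟩; exact absurd h hl

theorem make_shades_alt_eq_cov (alley : List Int) (k : Int) :
    make_shades_alt alley k
      = (PySem.List.pyRange 0 (alley.length : Int) 1).map
          (fun j => pvCov alley k (alley.length : Int) j) := by
  show (((PySem.List.pyRange 0 ((alley.length : Int)) 1).foldl
      (fun (s : Int × List Bool) j =>
        let run := s.1 + ((PySem.List.enumerate alley 0).foldl
          (pvLampUpd (alley.length : Int) k) PySem.Dict.empty).getD j 0
        (run, s.2 ++ [decide (0 < run)])) ((0 : Int), ([] : List Bool))).2)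
    = (PySem.List.pyRange 0 (alley.length : Int) 1).map
          (fun j => pvCov alley k (alley.length : Int) j)
  rw [pvScan]
  simp only []
  apply List.map_congr_left
  intro j hj
  rw [PySem.List.mem_pyRange_one] at hj
  rw [pvDiff_PS (alley.length : Int) k (PySem.List.enumerate alley 0) j hj.1
    PySem.Dict.empty (pvEnum_bound alley)]
  have hempty : pvPS PySem.Dict.empty (j + 1) = 0 := by
    unfold pvPS
    simp [PySem.Dict.getD_empty]
  rw [hempty, zero_add, Bool.eq_iff_iff, decide_eq_true_iff, Int.natCast_pos,
    List.countP_pos_iff, pvCov_iff]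
  constructor
  · rintro ⟨p, hp, hhit⟩
    have := (pvHit_iff alley k j p hj (pvEnum_bound alley p hp)).mp hhit
    exact ⟨p, hp, (pvEnum_bound alley p hp).2, this⟩
  · rintro ⟨p, hp, -, h2⟩
    exact ⟨p, hp, (pvHit_iff alley k j p hj (pvEnum_bound alley p hp)).mpr h2⟩


def pvCell (alley : List Int) (k m j : Int) : Option Int :=
  if (j < m ∧ 0 < PySem.List.pyGetD alley j 0) ∨
     (PySem.List.pyGetD alley j 0 = 0 ∧ pvCov alley k m j)
  then none else some (PySem.List.pyGetD alley j 0)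

def pvInv (alley : List Int) (k : Int) (m : Int) (st : List (Option Int)) : Prop :=
  st.length = alley.length ∧
  ∀ j : Int, 0 ≤ j → j < (alley.length : Int) →
    PySem.List.pyGetD st j none = pvCell alley k m j

theorem pvOrig_nonneg (alley : List Int) (k : Int) (hpre : Pre_make_shades alley k)
    (j : Int) (h0 : 0 ≤ j) (h1 : j < (alley.length : Int)) :
    0 ≤ PySem.List.pyGetD alley j 0 := by
  rw [PySem.List.pyGetD_eq_getElem alley 0 h0 h1]
  exact hpre _ (List.getElem_mem _)

theorem pvCov_zero' (alley : List Int) (k j : Int) : ¬ pvCov alley k 0 j := by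
  rw [pvCov_iff]
  rintro ⟨p, hp, h1, -⟩
  rw [PySem.List.mem_enumerate_iff] at hp
  obtain ⟨t, ht, rfl⟩ := hp
  simp at h1; omega

theorem pvCov_succ' (alley : List Int) (k m j : Int) (hm0 : 0 ≤ m) (hmn : m < (alley.length : Int)) :
    pvCov alley k (m + 1) j ↔ pvCov alley k m j ∨
      (0 < PySem.List.pyGetD alley m 0 ∧
       min m (m + k * PySem.List.pyGetD alley m 0) ≤ j ∧
       j ≤ max m (m + k * PySem.List.pyGetD alley m 0)) := by
  rw [pvCov_iff, pvCov_iff]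
  exact pvCov_succ alley k m j hm0 hmn

theorem pvCov_self (alley : List Int) (k m j : Int) (h0 : 0 ≤ j) (h1 : j < m)
    (h2 : j < (alley.length : Int)) (hl : 0 < PySem.List.pyGetD alley j 0) :
    pvCov alley k m j := by
  rw [pvCov_iff]
  refine ⟨(j, PySem.List.pyGetD alley j 0), ?_, h1, hl, ?_, ?_⟩
  · rw [PySem.List.mem_enumerate_iff]
    refine ⟨j.toNat, by omega, ?_⟩
    rw [← PySem.List.pyGetD_eq_getElem alley 0 h0 h2]
    simp; omega
  · exact min_le_left _ _
  · exact le_max_left _ _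

theorem pvStepA_inv (alley : List Int) (k : Int) (hpre : Pre_make_shades alley k)
    (m : Int) (hm0 : 0 ≤ m) (hmn : m < (alley.length : Int))
    (st : List (Option Int)) (hinv : pvInv alley k m st) :
    pvInv alley k (m + 1) (pvStepA alley k st m) := by
  obtain ⟨hlen, hpt⟩ := hinv
  set vm := PySem.List.pyGetD alley m 0 with hvm
  have hvm0 : 0 ≤ vm := pvOrig_nonneg alley k hpre m hm0 hmn
  have hcellm := hpt m hm0 hmn
  by_cases hz : vm = 0
  · -- the cell at m holds 0 (or was already painted): the step leaves st unchanged
    have hst : pvStepA alley k st m = st := by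
      unfold pvStepA
      rw [hcellm]
      unfold pvCell
      rw [← hvm]
      by_cases hcov : pvCov alley k m m
      · rw [if_pos (Or.inr ⟨hz, hcov⟩)]
      · rw [if_neg (by rintro (⟨a, b⟩ | ⟨-, c⟩); omega; exact hcov c)]
        simp only []
        rw [if_neg (by rintro ⟨-, b⟩; exact b hz)]
    rw [hst]
    refine ⟨hlen, fun j hj0 hjn => ?_⟩
    rw [hpt j hj0 hjn]
    unfold pvCell
    have hcov : pvCov alley k (m + 1) j ↔ pvCov alley k m j := by
      rw [pvCov_succ' alley k m j hm0 hmn, ← hvm]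
      constructor
      · rintro (h | ⟨h, -⟩); exact h; omega
      · exact Or.inl
    have hlt : (j < m + 1 ∧ 0 < PySem.List.pyGetD alley j 0) ↔
        (j < m ∧ 0 < PySem.List.pyGetD alley j 0) := by
      constructor
      · rintro ⟨h1, h2⟩
        refine ⟨?_, h2⟩
        rcases lt_or_ge j m with h | h
        · exact h
        · have : j = m := by omega
          rw [this] at h2; rw [← hvm] at h2; omega
      · rintro ⟨h1, h2⟩; exact ⟨by omega, h2⟩
    simp only [show ((j < m + 1 ∧ 0 < PySem.List.pyGetD alley j 0) ∨
        (PySem.List.pyGetD alley j 0 = 0 ∧ pvCov alley k (m + 1) j)) ↔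
        ((j < m ∧ 0 < PySem.List.pyGetD alley j 0) ∨
        (PySem.List.pyGetD alley j 0 = 0 ∧ pvCov alley k m j)) from by
      rw [hcov, hlt]]
  · -- vm > 0 : a lamp at m
    have hvpos : 0 < vm := by omega
    have hcm : PySem.List.pyGetD st m none = some vm := by
      rw [hcellm]; unfold pvCell; rw [← hvm]
      rw [if_neg (by rintro (⟨a, -⟩ | ⟨b, -⟩); omega; omega)]
    -- the lamp interval of m
    have hmin : 0 < k → min m (m + k * vm) = m := by
      intro hk; have : 0 < k * vm := mul_pos hk hvpos; omega
    have hmax : 0 < k → max m (m + k * vm) = m + k * vm := by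
      intro hk; have : 0 < k * vm := mul_pos hk hvpos; omega
    have hminneg : k < 0 → min m (m + k * vm) = m + k * vm := by
      intro hk; have : k * vm < 0 := mul_neg_of_neg_of_pos hk hvpos; omega
    have hmaxneg : k < 0 → max m (m + k * vm) = m := by
      intro hk; have : k * vm < 0 := mul_neg_of_neg_of_pos hk hvpos; omega
    have hcovsucc := fun j => pvCov_succ' alley k m j hm0 hmn
    -- unfold the step
    unfold pvStepA
    rw [hcm]
    simp only []
    rw [if_pos ⟨hvm0, hz⟩]
    set st1 := PySem.List.pySetD st m none with hst1
    have hlen1 : st1.length = alley.length := by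
      rw [hst1, PySem.List.length_pySetD, hlen]
    have hget1 : ∀ j : Int, 0 ≤ j →
        PySem.List.pyGetD st1 j none = if j = m then none else PySem.List.pyGetD st j none := by
      intro j hj0
      rw [hst1]
      exact pvGetD_setD st m j none none hm0 (by omega) hj0
    by_cases hkpos : 0 < k
    · -- forward
      rw [if_pos hkpos, if_neg (by omega)]
      refine ⟨by rw [pvFwd_len alley, hlen1], fun j hj0 hjn => ?_⟩
      rw [pvFwd_getD_aux alley (m + (k * vm + 1)) j hj0 hjn
        ((m + (k * vm + 1)) - m).toNat m st1 (le_refl _) hm0 hlen1]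
      rw [hget1 j hj0]
      unfold pvCell
      simp only [hcovsucc j, ← hvm]
      by_cases hjm : j = m
      · subst hjm
        rw [if_pos rfl]
        rw [if_neg (by rintro ⟨-, -, h⟩; simp at h)]
        rw [if_pos (Or.inl ⟨by omega, hvpos⟩)]
      · rw [if_neg hjm]
        rw [hpt j hj0 hjn]
        unfold pvCell
        by_cases hmk : (j < m ∧ 0 < PySem.List.pyGetD alley j 0) ∨
            (PySem.List.pyGetD alley j 0 = 0 ∧ pvCov alley k m j)
        · rw [if_pos hmk]
          rw [if_neg (by rintro ⟨-, -, h⟩; simp at h)]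
          rw [if_pos (by
            rcases hmk with ⟨a, b⟩ | ⟨a, b⟩
            · exact Or.inl ⟨by omega, b⟩
            · exact Or.inr ⟨a, Or.inl b⟩)]
        · rw [if_neg hmk]
          by_cases hrange : m ≤ j ∧ j < m + (k * vm + 1) ∧
              (some (PySem.List.pyGetD alley j 0) : Option Int) = some 0
          · rw [if_pos hrange]
            have hj0' : PySem.List.pyGetD alley j 0 = 0 := by
              have := hrange.2.2; simpa using this
            rw [if_pos (Or.inr ⟨hj0', Or.inr ⟨hvpos, by rw [hmin hkpos, hmax hkpos]; omega⟩⟩)]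
          · rw [if_neg hrange]
            rw [if_neg (by
              rintro (⟨a, b⟩ | ⟨a, (c | ⟨-, c⟩)⟩)
              · exact hmk (Or.inl ⟨by omega, b⟩)
              · exact hmk (Or.inr ⟨a, c⟩)
              · rw [hmin hkpos, hmax hkpos] at c
                exact hrange ⟨c.1, by omega, by rw [a]⟩)]
    · -- k ≤ 0
      rw [if_neg hkpos]
      by_cases hkneg : k < 0
      · -- backward
        rw [if_pos hkneg]
        have hb : m - ((k * -1) * vm + 1) + 1 = m + k * vm := by ring
        refine ⟨by rw [pvBwd_len, hlen1], fun j hj0 hjn => ?_⟩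
        rw [pvBwd_getD m j hj0 (m - (m - ((k * -1) * vm + 1) + 1)).toNat
          (m - ((k * -1) * vm + 1) + 1) st1 (le_refl _) (by omega)]
        rw [hget1 j hj0]
        unfold pvCell
        simp only [hcovsucc j, ← hvm]
        rw [hb]
        by_cases hjm : j = m
        · subst hjm
          rw [if_neg (by omega), if_pos rfl, if_pos (Or.inl ⟨by omega, hvpos⟩)]
        · by_cases hrange : m + k * vm ≤ j ∧ j < m
          · rw [if_pos hrange]
            have horigj : 0 ≤ PySem.List.pyGetD alley j 0 := pvOrig_nonneg alley k hpre j hj0 hjn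
            by_cases hpos : 0 < PySem.List.pyGetD alley j 0
            · rw [if_pos (Or.inl ⟨by omega, hpos⟩)]
            · rw [if_pos (Or.inr ⟨by omega, Or.inr ⟨hvpos, by
                rw [hminneg hkneg, hmaxneg hkneg]; omega⟩⟩)]
          · rw [if_neg hrange, if_neg hjm]
            rw [hpt j hj0 hjn]
            unfold pvCell
            simp only [show ((j < m + 1 ∧ 0 < PySem.List.pyGetD alley j 0) ∨
                (PySem.List.pyGetD alley j 0 = 0 ∧ (pvCov alley k m j ∨
                  (0 < vm ∧ min m (m + k * vm) ≤ j ∧ j ≤ max m (m + k * vm))))) ↔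
                ((j < m ∧ 0 < PySem.List.pyGetD alley j 0) ∨
                (PySem.List.pyGetD alley j 0 = 0 ∧ pvCov alley k m j)) from by
              constructor
              · rintro (⟨a, b⟩ | ⟨a, (c | ⟨-, c⟩)⟩)
                · exact Or.inl ⟨by omega, b⟩
                · exact Or.inr ⟨a, c⟩
                · rw [hminneg hkneg, hmaxneg hkneg] at c
                  exact absurd ⟨c.1, by omega⟩ hrange
              · rintro (⟨a, b⟩ | ⟨a, c⟩)
                · exact Or.inl ⟨by omega, b⟩
                · exact Or.inr ⟨a, Or.inl c⟩]
      · -- k = 0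
        have hk0 : k = 0 := by omega
        rw [if_neg hkneg]
        refine ⟨hlen1, fun j hj0 hjn => ?_⟩
        rw [hget1 j hj0]
        unfold pvCell
        simp only [hcovsucc j, ← hvm]
        by_cases hjm : j = m
        · subst hjm
          rw [if_pos rfl, if_pos (Or.inl ⟨by omega, hvpos⟩)]
        · rw [if_neg hjm]
          rw [hpt j hj0 hjn]
          unfold pvCell
          simp only [show ((j < m + 1 ∧ 0 < PySem.List.pyGetD alley j 0) ∨
              (PySem.List.pyGetD alley j 0 = 0 ∧ (pvCov alley k m j ∨
                (0 < vm ∧ min m (m + k * vm) ≤ j ∧ j ≤ max m (m + k * vm))))) ↔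
              ((j < m ∧ 0 < PySem.List.pyGetD alley j 0) ∨
              (PySem.List.pyGetD alley j 0 = 0 ∧ pvCov alley k m j)) from by
            constructor
            · rintro (⟨a, b⟩ | ⟨a, (c | ⟨-, c⟩)⟩)
              · exact Or.inl ⟨by omega, b⟩
              · exact Or.inr ⟨a, c⟩
              · rw [hk0] at c; simp at c; omega
            · rintro (⟨a, b⟩ | ⟨a, c⟩)
              · exact Or.inl ⟨by omega, b⟩
              · exact Or.inr ⟨a, Or.inl c⟩]

theorem pvLoopA_inv (alley : List Int) (k : Int) (hpre : Pre_make_shades alley k) :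
    ∀ (m : Nat), m ≤ alley.length →
    pvInv alley k (m : Int)
      ((PySem.List.pyRange 0 (m : Int) 1).foldl (pvStepA alley k) (alley.map some)) := by
  intro m
  induction m with
  | zero =>
    intro _
    simp only [Nat.cast_zero]
    rw [PySem.List.pyRange_one_eq_nil (le_refl (0 : Int))]
    simp only [List.foldl_nil]
    refine ⟨by simp, fun j hj0 hjn => ?_⟩
    have hjlen : j < ((alley.map some).length : Int) := by simpa using hjn
    rw [PySem.List.pyGetD_eq_getElem _ none hj0 hjlen]
    unfold pvCell
    rw [if_neg (by rintro (⟨a, -⟩ | ⟨-, c⟩); omega; exact pvCov_zero' alley k j c)]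
    rw [List.getElem_map]
    rw [PySem.List.pyGetD_eq_getElem alley 0 hj0 hjn]
  | succ m ih =>
    intro hm
    have hcast : ((m + 1 : Nat) : Int) = (m : Int) + 1 := by push_cast; ring
    rw [hcast, PySem.List.pyRange_one_succ_right (by omega), List.foldl_append]
    simp only [List.foldl_cons, List.foldl_nil]
    exact pvStepA_inv alley k hpre (m : Int) (by omega) (by omega) _ (ih (by omega))

theorem make_shades_eq_cov (alley : List Int) (k : Int) (hpre : Pre_make_shades alley k) :
    make_shades alley k
      = (PySem.List.pyRange 0 (alley.length : Int) 1).map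
          (fun j => pvCov alley k (alley.length : Int) j) := by
  obtain ⟨hlen, hpt⟩ := pvLoopA_inv alley k hpre alley.length (le_refl _)
  show ((PySem.List.pyRange 0 ((alley.length : Int)) 1).foldl (pvStepA alley k) (alley.map some)).map
      (fun c => match c with
        | none => true
        | some v => if v = 0 then false else true)
    = (PySem.List.pyRange 0 (alley.length : Int) 1).map
        (fun j => pvCov alley k (alley.length : Int) j)
  set st := (PySem.List.pyRange 0 ((alley.length : Int)) 1).foldl (pvStepA alley k) (alley.map some) with hst
  apply List.ext_getElem
  · rw [List.length_map, List.length_map, hlen, PySem.List.length_pyRange_one]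
    omega
  · intro t ht1 ht2
    simp only [List.getElem_map]
    have htn : t < alley.length := by
      rw [List.length_map, hlen] at ht1
      exact ht1
    have hstlen : t < st.length := by omega
    have hgetst : PySem.List.pyGetD st (t : Int) none = st[t]'hstlen := by
      rw [PySem.List.pyGetD_eq_getElem st none (by omega) (by exact_mod_cast hstlen)]
      congr 1
    have hcell := hpt (t : Int) (by omega) (by exact_mod_cast htn)
    rw [hgetst] at hcell
    have ht2' : t < (PySem.List.pyRange 0 ((alley.length : Int)) 1).length := by
      rw [PySem.List.length_pyRange_one]; omega
    have hrange : (PySem.List.pyRange 0 ((alley.length : Int)) 1)[t]'ht2' = (t : Int) := by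
      rw [PySem.List.getElem_pyRange_one]
      omega
    rw [hcell, hrange]
    have horig := pvOrig_nonneg alley k hpre (t : Int) (by omega) (by exact_mod_cast htn)
    unfold pvCell
    by_cases hz : PySem.List.pyGetD alley (t : Int) 0 = 0
    · by_cases hcov : pvCov alley k (alley.length : Int) (t : Int)
      · rw [if_pos (Or.inr ⟨hz, hcov⟩)]
        simp [hcov]
      · rw [if_neg (by rintro (⟨-, b⟩ | ⟨-, c⟩); omega; exact hcov c)]
        simp [hcov, hz]
    · have hpos : 0 < PySem.List.pyGetD alley (t : Int) 0 := by omega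
      have hcov : pvCov alley k (alley.length : Int) (t : Int) :=
        pvCov_self alley k (alley.length : Int) (t : Int) (by omega) (by exact_mod_cast htn)
          (by exact_mod_cast htn) hpos
      rw [if_pos (Or.inl ⟨by exact_mod_cast htn, hpos⟩)]
      simp [hcov]

-- ===== VERDICT (by name: the statement is the Claim_ definition above) =====
theorem make_shades_spec : Claim_equal_make_shades := by
  intro alley k _ hpre
  unfold Spec_make_shades
  rw [make_shades_eq_cov alley k hpre, make_shades_alt_eq_cov alley k]
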